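-- pv_equiv track=rewrite | github.com/ElsidRickPanolino/cse_mathquiz_unittest | main.py | verifyDivide
-- ===== SOURCE A (Python) =====
-- def verifyDivide(min,max):
--     list = []
--     for i in range(min, max//2):
--         if i == 1:
--             continue
--         for j in range(min, max//2):
--             j = max -j
--             if j%i == 0:
--                 list.append([j,i])
--     return list
-- ===== SOURCE B (Python) =====
-- def verifyDivide(min, max):
--     half = max // 2
--     result = []
--     hi = max - min          # largest candidate value max - j
--     stop = max - half       # exclusive lower bound of the candidate values
--     for i in range(min, half):
--         if i == 1:
--             continue
--         a = abs(i)
--         # walk the multiples of i inside (stop, hi] downward instead of testing every j for divisibility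
--         for v in range(hi - hi % a, stop, -a):
--             result.append([v, i])
--     return result
-- ===== Notes on version B (the rewrite author's own statement) =====
-- stated objective: alternative
-- what changed: Instead of testing every j in range(min, max//2) for divisibility (a full inner scan per i), B steps directly through the multiples of |i| in the candidate value interval with a downward range of stride |i|, producing the same pairs in the same order.
import Mathlib
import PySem

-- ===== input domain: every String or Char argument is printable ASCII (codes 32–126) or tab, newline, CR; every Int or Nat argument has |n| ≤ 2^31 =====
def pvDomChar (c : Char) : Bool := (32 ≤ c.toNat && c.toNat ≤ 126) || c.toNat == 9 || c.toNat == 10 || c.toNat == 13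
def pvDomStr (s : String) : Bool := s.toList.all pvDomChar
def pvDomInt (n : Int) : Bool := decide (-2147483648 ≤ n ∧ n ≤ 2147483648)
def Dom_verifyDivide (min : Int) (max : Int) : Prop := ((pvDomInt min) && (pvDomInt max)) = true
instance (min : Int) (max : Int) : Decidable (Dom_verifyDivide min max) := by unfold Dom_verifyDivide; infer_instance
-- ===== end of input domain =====

-- B replaces A's inner divisibility scan over every j by a downward stride-|i| range over the
-- multiples of |i| in the candidate interval: the same pairs in the same order, enumerated differently.

-- ===== PORT A =====
def verifyDivide (min : Int) (max : Int) : List (List Int) :=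
  (PySem.List.pyRange min (PySem.Int.floordiv max 2) 1).foldl (fun list i =>
    if i = 1 then list
    else
      (PySem.List.pyRange min (PySem.Int.floordiv max 2) 1).foldl (fun list j =>
        let j' := max - j
        if PySem.Int.mod j' i = 0 then list ++ [[j', i]] else list) list) []

-- ===== PORT B =====
def verifyDivide_alt (min : Int) (max : Int) : List (List Int) :=
  let half := PySem.Int.floordiv max 2
  let hi := max - min
  let stop := max - half
  (PySem.List.pyRange min half 1).foldl (fun result i =>
    if i = 1 then result
    else
      let a := |i|
      (PySem.List.pyRange (hi - PySem.Int.mod hi a) stop (-a)).foldl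
        (fun result v => result ++ [[v, i]]) result) []

-- ===== PRECONDITION & SPEC =====
-- Pre_ excludes exactly the inputs with 0 ∈ range(min, max//2): there both A and B raise
-- ZeroDivisionError (A on j % 0, B on hi % abs(0)).
def Pre_verifyDivide (min : Int) (max : Int) : Prop :=
  ¬ (min ≤ 0 ∧ 0 < PySem.Int.floordiv max 2)
instance (min : Int) (max : Int) : Decidable (Pre_verifyDivide min max) := by
  unfold Pre_verifyDivide; infer_instance

def pvWitness_verifyDivide : Int × Int := (2, 20)

def Spec_verifyDivide (min : Int) (max : Int) (out : List (List Int)) : Prop := out = verifyDivide_alt min max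
instance (min : Int) (max : Int) (out : List (List Int)) : Decidable (Spec_verifyDivide min max out) := by unfold Spec_verifyDivide; infer_instance

-- ===== CLAIM (what is proved, stated in full; the proofs are below) =====
def Claim_equal_verifyDivide : Prop := ∀ (min : Int) (max : Int), Dom_verifyDivide min max → Pre_verifyDivide min max → Spec_verifyDivide min max (verifyDivide min max)

-- ===== LEMMAS AND PROOFS =====

-- range(a, b, -s) for 0 < s as an explicit map over List.range
theorem pyRange_negstep (a b s : Int) (hs : 0 < s) :
    PySem.List.pyRange a b (-s)
      = (List.range (if b < a then ((a - b + s - 1) / s).toNat else 0)).map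
          (fun (k : Nat) => a - s * (k : Int)) := by
  unfold PySem.List.pyRange
  rw [if_neg (by omega : ¬ (-s : Int) = 0)]
  simp only
  rw [if_neg (by omega : ¬ (0:Int) < -s)]
  simp only [neg_neg]
  apply List.map_congr_left
  intro k _
  ring

-- range(a, b, -s) for 0 < s is empty when a ≤ b
theorem pyRange_negstep_nil (a b s : Int) (hs : 0 < s) (h : a ≤ b) :
    PySem.List.pyRange a b (-s) = [] := by
  rw [pyRange_negstep a b s hs, if_neg (by omega)]
  simp

-- range(a, b, -s) for 0 < s, b < a peels off its first element
theorem pyRange_negstep_cons (a b s : Int) (hs : 0 < s) (h : b < a) :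
    PySem.List.pyRange a b (-s) = a :: PySem.List.pyRange (a - s) b (-s) := by
  rw [pyRange_negstep a b s hs, pyRange_negstep (a - s) b s hs, if_pos h]
  have h1 : (1 : Int) ≤ (a - b + s - 1) / s := by
    rw [Int.le_ediv_iff_mul_le hs]; omega
  by_cases hb : b < a - s
  · have h2 : (a - s - b + s - 1) / s = (a - b + s - 1) / s - 1 := by
      have h3 : a - s - b + s - 1 = (a - b + s - 1) + (-1) * s := by ring
      rw [h3, Int.add_mul_ediv_right _ _ (by omega : s ≠ 0)]
      omega
    rw [if_pos hb]
    have h4 : ((a - b + s - 1) / s).toNat = ((a - s - b + s - 1) / s).toNat + 1 := by omega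
    rw [h4, List.range_succ_eq_map, List.map_cons, List.map_map]
    congr 1
    · ring
    · apply List.map_congr_left
      intro k _
      simp only [Function.comp]
      push_cast
      ring
  · rw [if_neg hb]
    have h5 : (a - b + s - 1) / s ≤ 1 := by
      by_contra hc
      have h7 : (2:Int) ≤ (a - b + s - 1) / s := by omega
      have h8 := (Int.le_ediv_iff_mul_le hs).mp h7
      omega
    have h6 : ((a - b + s - 1) / s).toNat = 1 := by omega
    rw [h6]
    simp

theorem emod_pred_of_dvd (a x : Int) (ha : 0 < a) (h : a ∣ x) : (x - 1) % a = a - 1 := by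
  obtain ⟨q, hq⟩ := h
  have h1 : x - 1 = (-1) + q * a := by rw [hq]; ring
  rw [h1, Int.add_mul_emod_self_right]
  have h2 : (a - 1) % a = a - 1 := Int.emod_eq_of_lt (by omega) (by omega)
  have h3 : (-1 : Int) % a = (a - 1) % a := by
    have h4 : (a : Int) - 1 = -1 + a * 1 := by ring
    rw [h4, Int.add_mul_emod_self_left]
  rw [h3, h2]

theorem emod_pred_of_not_dvd (a x : Int) (ha : 0 < a) (h : ¬ a ∣ x) : (x - 1) % a = x % a - 1 := by
  have hr0 : 0 ≤ x % a := Int.emod_nonneg x (by omega)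
  have hrl : x % a < a := Int.emod_lt_of_pos x ha
  have hne : x % a ≠ 0 := fun hc => h (Int.dvd_of_emod_eq_zero hc)
  have hd := Int.emod_add_mul_ediv x a
  have h1 : x - 1 = (x % a - 1) + a * (x / a) := by omega
  rw [h1, Int.add_mul_emod_self_left]
  exact Int.emod_eq_of_lt (by omega) (by omega)

-- MAIN: keeping only the multiples of a in the descending unit range IS the stride-a range
theorem filter_dvd_countdown (a : Int) (ha : 0 < a) :
    ∀ (n : Nat) (L hi : Int), hi - L = n →
    ((List.range n).map (fun (k : Nat) => hi - (k : Int))).filter (fun v => decide (a ∣ v))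
      = PySem.List.pyRange (hi - PySem.Int.mod hi a) L (-a) := by
  intro n
  induction n with
  | zero =>
    intro L hi hn
    simp only [List.range_zero, List.map_nil, List.filter_nil]
    have hm : 0 ≤ PySem.Int.mod hi a := PySem.Int.mod_nonneg hi ha
    exact (pyRange_negstep_nil _ _ _ ha (by omega)).symm
  | succ n ih =>
    intro L hi hn
    rw [List.range_succ_eq_map, List.map_cons, List.map_map, List.filter_cons]
    have hmap : (List.range n).map ((fun (k : Nat) => hi - (k : Int)) ∘ (fun i => i + 1))
        = (List.range n).map (fun (k : Nat) => (hi - 1) - (k : Int)) := by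
      apply List.map_congr_left; intro k _
      simp only [Function.comp]; push_cast; ring
    rw [hmap, ih L (hi - 1) (by omega)]
    have hmodeq : PySem.Int.mod hi a = hi % a := PySem.Int.mod_eq_emod_of_pos ha
    have hmodeq' : PySem.Int.mod (hi - 1) a = (hi - 1) % a :=
      PySem.Int.mod_eq_emod_of_pos ha
    by_cases hdvd : a ∣ hi
    · have hz : hi % a = 0 := Int.emod_eq_zero_of_dvd hdvd
      have hstep : hi - 1 - PySem.Int.mod (hi - 1) a = hi - a := by
        rw [hmodeq', emod_pred_of_dvd a hi ha hdvd]; ring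
      rw [hstep]
      simp only [Nat.cast_zero, sub_zero, decide_eq_true_eq]
      rw [if_pos (by simpa using hdvd)]
      have hs0 : hi - PySem.Int.mod hi a = hi := by rw [hmodeq, hz]; ring
      rw [hs0, pyRange_negstep_cons hi L a ha (by omega)]
    · have hstep : hi - 1 - PySem.Int.mod (hi - 1) a = hi - PySem.Int.mod hi a := by
        rw [hmodeq', hmodeq, emod_pred_of_not_dvd a hi ha hdvd]; ring
      rw [hstep]
      simp only [Nat.cast_zero, sub_zero]
      rw [if_neg (by simpa using hdvd)]

-- the inner loop of A equals the inner loop of B, for the i ≠ 0, i ≠ 1 in play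
theorem inner_eq (min max i : Int) (hi0 : i ≠ 0) (hlt : min < PySem.Int.floordiv max 2)
    (acc : List (List Int)) :
    (PySem.List.pyRange min (PySem.Int.floordiv max 2) 1).foldl (fun list j =>
        if PySem.Int.mod (max - j) i = 0 then list ++ [[max - j, i]] else list) acc
      = (PySem.List.pyRange ((max - min) - PySem.Int.mod (max - min) |i|)
            (max - PySem.Int.floordiv max 2) (-|i|)).foldl
          (fun result v => result ++ [[v, i]]) acc := by
  have ha : 0 < |i| := abs_pos.mpr hi0
  set half := PySem.Int.floordiv max 2 with hhalf
  rw [PySem.List.foldl_append_ite (p := fun j => PySem.Int.mod (max - j) i = 0)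
        (f := fun j => [max - j, i])]
  rw [PySem.List.foldl_append_singleton_eq_map]
  congr 1
  rw [← filter_dvd_countdown |i| ha ((half - min).toNat) (max - half) (max - min) (by omega)]
  rw [PySem.List.pyRange_one]
  rw [List.filter_map, List.filter_map, List.map_map, List.map_map]
  have hfilter : (List.range (half - min).toNat).filter
        ((fun j => decide (PySem.Int.mod (max - j) i = 0)) ∘ (fun (k : Nat) => min + (k : Int)))
      = (List.range (half - min).toNat).filter
        ((fun v => decide (|i| ∣ v)) ∘ (fun (k : Nat) => max - min - (k : Int))) := by
    apply List.filter_congr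
    intro k _
    simp only [Function.comp, decide_eq_decide]
    rw [PySem.Int.mod_eq_zero_iff_dvd, abs_dvd]
    constructor <;> (intro h; convert h using 1; ring)
  rw [hfilter]
  apply List.map_congr_left
  intro k _
  simp only [Function.comp]
  have h9 : max - (min + (k : Int)) = max - min - (k : Int) := by ring
  rw [h9]

-- ===== VERDICT (by name: the statement is the Claim_ definition above) =====
theorem verifyDivide_spec : Claim_equal_verifyDivide := by
  intro min max _ hpre
  unfold Spec_verifyDivide verifyDivide verifyDivide_alt
  simp only
  apply PySem.List.foldl_congr_mem
  intro acc i hmem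
  have hbounds := (PySem.List.mem_pyRange_one).mp hmem
  have hi0 : i ≠ 0 := by
    intro h; subst h
    exact hpre ⟨by omega, by omega⟩
  by_cases h1 : i = 1
  · simp [h1]
  · rw [if_neg h1, if_neg h1]
    exact inner_eq min max i hi0 (by omega) acc
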